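-- pv_equiv track=rewrite | github.com/pair0/Programmers | 연습문제/LV3/인사고과.py | solution
-- ===== SOURCE A (Python) =====
-- def solution(scores):
--     answer = 1
--     N = len(scores)
--
--     OwanHo = scores[0]
--     scores = sorted(scores[1:], key=lambda x: (-x[0], x[1]))
--     list_N = list()
--     maxb = 0
--
--     for i, j in scores:
--         if OwanHo[0] < i and OwanHo[1] < j:
--             return -1
--         elif j >= maxb:
--             maxb = j
--             if i + j > sum(OwanHo):
--                 answer += 1
--     return answer
-- ===== SOURCE B (Python) =====
-- def _dominated(p, others):
--     return any(c > p[0] and d > p[1] for c, d in others)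
--
-- def solution(scores):
--     owan = scores[0]
--     others = scores[1:]
--     if _dominated(owan, others):
--         return -1
--     s = owan[0] + owan[1]
--     return 1 + sum(1 for a, b in others if a + b > s and not _dominated((a, b), others))
-- ===== Notes on version B (the rewrite author's own statement) =====
-- stated objective: alternative
-- what changed: B drops A's sort-then-frontier-scan entirely and counts, by a direct pairwise dominance test over the unsorted tail, the candidates that beat the owner's sum and are not strictly dominated in both coordinates by anyone.
-- intended difference: On inputs where no one strictly beats the owner in both scores but some candidate has a negative second score, beats the owner's sum, and is dominated by nobody, A's running maximum starts at 0 and silently skips that candidate (returning a count that is too small), while B counts it; B's value is the intended one because a candidate dominated by nobody is visible regardless of the sign of its scores. — e.g. on solution([(0, 0), (5, -1)]): A returns 1, B returns 2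
import Mathlib
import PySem

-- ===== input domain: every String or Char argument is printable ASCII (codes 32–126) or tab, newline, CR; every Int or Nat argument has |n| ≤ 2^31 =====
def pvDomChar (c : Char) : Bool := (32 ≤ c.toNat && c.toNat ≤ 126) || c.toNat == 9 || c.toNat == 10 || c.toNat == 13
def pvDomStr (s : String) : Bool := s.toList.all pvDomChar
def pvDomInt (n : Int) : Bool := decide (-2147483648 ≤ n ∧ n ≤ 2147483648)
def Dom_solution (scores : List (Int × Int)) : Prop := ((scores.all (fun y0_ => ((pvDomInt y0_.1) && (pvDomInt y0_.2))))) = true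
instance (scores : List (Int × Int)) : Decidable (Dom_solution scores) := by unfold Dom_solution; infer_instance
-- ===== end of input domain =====

-- B replaces A's sort + running-max frontier scan by a direct pairwise dominance count over the
-- unsorted tail (objective: alternative O(n^2) algorithm with no sort); A raises IndexError on [],
-- excluded by Pre_; on the D_ inputs below A's 0-initialised running max skips a visible candidate
-- with a negative second score and B counts it (the intended value).

-- ===== PORT A =====
-- 'OwanHo[0] < i and OwanHo[1] < j' from A's loop
def pyLtBoth (p q : Int × Int) : Bool := decide (p.1 < q.1) && decide (p.2 < q.2)
-- 'sum(tuple)' as A applies it to the pair OwanHo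
def pySum (p : Int × Int) : Int := p.1 + p.2

def solutionLoop (OwanHo : Int × Int) : List (Int × Int) → Int → Int → Int
  | [], _maxb, answer => answer
  | (i, j) :: rest, maxb, answer =>
    if pyLtBoth OwanHo (i, j) then -1
    else if maxb ≤ j then
      solutionLoop OwanHo rest j (if pySum OwanHo < i + j then answer + 1 else answer)
    else solutionLoop OwanHo rest maxb answer

def solution (scores : List (Int × Int)) : Int :=
  match PySem.List.pyGet? scores 0 with
  | none => 0   -- unreachable under Pre_solution (Python raises IndexError on [])
  | some OwanHo =>
    let sortedScores := PySem.List.sorted2 (PySem.List.slice scores (some 1) none)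
      (fun x => -x.1) (fun x => x.2)
    solutionLoop OwanHo sortedScores 0 1

-- ===== PORT B =====
def pyDominated (p : Int × Int) (others : List (Int × Int)) : Bool :=
  others.any (fun q => decide (p.1 < q.1) && decide (p.2 < q.2))

def solution_alt (scores : List (Int × Int)) : Int :=
  match scores with
  | [] => 0   -- unreachable under Pre_solution
  | ow :: others =>
    if pyDominated ow others then -1
    else
      1 + (List.countP (fun p => decide (ow.1 + ow.2 < p.1 + p.2) &&
            !(pyDominated p others)) others : Int)

-- ===== PRECONDITION & SPEC =====
-- Pre_ excludes only the empty list, on which Python's scores[0] raises IndexError.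
def Pre_solution (scores : List (Int × Int)) : Prop := scores ≠ []
instance (scores : List (Int × Int)) : Decidable (Pre_solution scores) := by
  unfold Pre_solution; infer_instance
def pvWitness_solution : (List (Int × Int)) := [(0, 0)]

-- On inputs where no candidate strictly beats the owner in both scores but some candidate has a
-- negative second score, beats the owner's sum and is strictly dominated by nobody, A's running
-- maximum starts at 0 and silently skips that candidate (count too small), while B counts it;
-- B's value is intended since an undominated candidate is visible regardless of sign.
def D_solution (scores : List (Int × Int)) : Prop :=
  let ow := scores.headD (0, 0)
  (∀ q ∈ scores.tail, ¬pyLtBoth ow q) ∧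
  ∃ p ∈ scores.tail, 0 > p.2 ∧ pySum ow < pySum p ∧ ∀ q ∈ scores.tail, ¬pyLtBoth p q
instance (scores : List (Int × Int)) : Decidable (D_solution scores) := by
  unfold D_solution; infer_instance

def Spec_solution (scores : List (Int × Int)) (out : Int) : Prop :=
  ¬ D_solution scores → out = solution_alt scores
instance (scores : List (Int × Int)) (out : Int) : Decidable (Spec_solution scores out) := by
  unfold Spec_solution; infer_instance

def pvDiffWitness_solution : (List (Int × Int)) := [(0, 0), (5, -1)]
def pvDiffWitnessOut_solution : Int × Int := (1, 2)

-- ===== CLAIM (what is proved, stated in full; the proofs are below) =====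
def Claim_unchanged_solution : Prop := ∀ (scores : List (Int × Int)), Dom_solution scores → Pre_solution scores → Spec_solution scores (solution scores)
def Claim_changed_solution : Prop := Dom_solution (pvDiffWitness_solution) ∧ Pre_solution (pvDiffWitness_solution) ∧ D_solution (pvDiffWitness_solution) ∧ solution (pvDiffWitness_solution) = pvDiffWitnessOut_solution.1 ∧ solution_alt (pvDiffWitness_solution) = pvDiffWitnessOut_solution.2 ∧ pvDiffWitnessOut_solution.1 ≠ pvDiffWitnessOut_solution.2
def Claim_exact_solution : Prop := ∀ (scores : List (Int × Int)), Dom_solution scores → Pre_solution scores → D_solution scores → solution scores ≠ solution_alt scores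

-- ===== LEMMAS AND PROOFS =====

-- lexicographic ≤ on the sort key (-x.1, x.2)
def keyLE (p q : Int × Int) : Prop := q.1 < p.1 ∨ (p.1 = q.1 ∧ p.2 ≤ q.2)

theorem keyLE_trans : Transitive keyLE := by
  intro a b c hab hbc; unfold keyLE at *; omega

theorem pairwise_insertBy {α : Type} (before : α → α → Bool) (R : α → α → Prop)
    (h1 : ∀ a b, before a b = false → R b a) (h2 : ∀ a b, before a b = true → R a b)
    (htrans : Transitive R) :
    ∀ (l : List α) (x : α), l.Pairwise R → (PySem.List.insertBy before x l).Pairwise R := by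
  intro l
  induction l with
  | nil => intro x _; simp [PySem.List.insertBy]
  | cons y ys ih =>
    intro x hp
    rcases List.pairwise_cons.mp hp with ⟨hy, hys⟩
    by_cases hb : before x y = true
    · simp only [PySem.List.insertBy, hb, if_true]
      refine List.pairwise_cons.mpr ⟨?_, hp⟩
      intro z hz
      rcases List.mem_cons.mp hz with rfl | hz'
      · exact h2 _ _ hb
      · exact htrans (h2 _ _ hb) (hy z hz')
    · simp only [PySem.List.insertBy, hb, if_false]
      refine List.pairwise_cons.mpr ⟨?_, ih x hys⟩
      intro z hz
      rcases (PySem.List.mem_insertBy _ _ _ _).mp hz with rfl | hz'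
      · exact h1 _ _ (by simpa using hb)
      · exact hy z hz'

theorem sorted2_pairwise_keyLE (xs : List (Int × Int)) :
    (PySem.List.sorted2 xs (fun x => -x.1) (fun x => x.2) false).Pairwise keyLE := by
  have h1 : ∀ a b : Int × Int,
      (decide ((-a.1) < (-b.1)) || (!decide ((-b.1) < (-a.1)) && decide (a.2 < b.2))) = false →
      keyLE b a := by
    intro a b h; unfold keyLE
    simp only [Bool.or_eq_false_iff, Bool.and_eq_false_iff, decide_eq_false_iff_not,
      Bool.not_eq_false', decide_eq_true_eq] at h
    omega
  have h2 : ∀ a b : Int × Int,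
      (decide ((-a.1) < (-b.1)) || (!decide ((-b.1) < (-a.1)) && decide (a.2 < b.2))) = true →
      keyLE a b := by
    intro a b h; unfold keyLE
    simp only [Bool.or_eq_true, Bool.and_eq_true, decide_eq_true_eq, Bool.not_eq_true',
      decide_eq_false_iff_not] at h
    omega
  have main : ∀ (l : List (Int × Int)) (acc : List (Int × Int)), acc.Pairwise keyLE →
      (List.foldl (fun acc x => PySem.List.insertBy
        (fun a b => decide ((-a.1) < (-b.1)) || (!decide ((-b.1) < (-a.1)) && decide (a.2 < b.2)))
        x acc) acc l).Pairwise keyLE := by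
    intro l
    induction l with
    | nil => intro acc h; simpa using h
    | cons x t ih =>
      intro acc h
      exact ih _ (pairwise_insertBy _ keyLE h1 h2 keyLE_trans acc x h)
  simp only [PySem.List.sorted2]
  exact main xs [] List.Pairwise.nil

-- A's loop on a key-sorted, owner-undominated list counts exactly the members p with
-- maxb ≤ p.2, p undominated within the list, and sum above the owner's sum.
theorem loopA_eq (ow : Int × Int) :
    ∀ (L : List (Int × Int)) (maxb answer : Int),
    L.Pairwise keyLE → (∀ p ∈ L, ¬(ow.1 < p.1 ∧ ow.2 < p.2)) →
    solutionLoop ow L maxb answer = answer +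
      (List.countP (fun p => decide (maxb ≤ p.2) &&
        !(L.any (fun q => decide (p.1 < q.1) && decide (p.2 < q.2))) &&
        decide (ow.1 + ow.2 < p.1 + p.2)) L : Int) := by
  intro L
  induction L with
  | nil => intro maxb answer _ _; simp [solutionLoop]
  | cons x rest ih =>
    intro maxb answer hp hnd
    rcases List.pairwise_cons.mp hp with ⟨hx, hrest⟩
    obtain ⟨i, j⟩ := x
    have hndx : ¬(ow.1 < i ∧ ow.2 < j) := hnd (i, j) (List.mem_cons_self)
    have hxb : pyLtBoth ow (i, j) = false := by
      simp only [pyLtBoth, Bool.and_eq_false_iff, decide_eq_false_iff_not]; omega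
    have hndr : ∀ p ∈ rest, ¬(ow.1 < p.1 ∧ ow.2 < p.2) :=
      fun p hp' => hnd p (List.mem_cons_of_mem _ hp')
    -- the head is never dominated within x :: rest
    have hheadnd : ((i, j) :: rest).any
        (fun q => decide ((i:Int) < q.1) && decide ((j:Int) < q.2)) = false := by
      simp only [List.any_eq_false]
      intro q hq
      rcases List.mem_cons.mp hq with rfl | hq'
      · simp
      · have := hx q hq'; unfold keyLE at this
        simp only [Bool.and_eq_true, decide_eq_true_eq, not_and]
        omega
    simp only [solutionLoop, hxb, Bool.false_eq_true, if_false, pySum]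
    by_cases hmb : maxb ≤ j
    · rw [if_pos hmb, ih j _ hrest hndr]
      have hcong : List.countP (fun p => decide ((j:Int) ≤ p.2) &&
          !(rest.any (fun q => decide (p.1 < q.1) && decide (p.2 < q.2))) &&
          decide (ow.1 + ow.2 < p.1 + p.2)) rest
          = List.countP (fun p => decide (maxb ≤ p.2) &&
          !(((i, j) :: rest).any (fun q => decide (p.1 < q.1) && decide (p.2 < q.2))) &&
          decide (ow.1 + ow.2 < p.1 + p.2)) rest := by
        apply List.countP_congr
        intro p hmem
        have hkey := hx p hmem
        unfold keyLE at hkey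
        simp only [List.any_cons, Bool.and_eq_true, Bool.or_eq_true, Bool.not_eq_true',
          Bool.or_eq_false_iff, Bool.and_eq_false_iff, decide_eq_true_eq,
          decide_eq_false_iff_not, List.any_eq_false]
        constructor
        · rintro ⟨⟨hjp, hnod⟩, hs⟩
          exact ⟨⟨by omega, ⟨by omega, hnod⟩⟩, hs⟩
        · rintro ⟨⟨hmp, ⟨hhead, hnod⟩⟩, hs⟩
          refine ⟨⟨?_, hnod⟩, hs⟩
          omega
      rw [hcong]
      simp only [List.countP_cons, hheadnd, hmb, decide_true, Bool.not_false, Bool.true_and]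
      by_cases hs : ow.1 + ow.2 < i + j
      · simp only [hs, if_pos, decide_true, if_true]; push_cast; ring
      · simp only [hs, decide_false, if_false]; push_cast; ring
    · rw [if_neg hmb, ih maxb _ hrest hndr]
      have hcong : List.countP (fun p => decide (maxb ≤ p.2) &&
          !(rest.any (fun q => decide (p.1 < q.1) && decide (p.2 < q.2))) &&
          decide (ow.1 + ow.2 < p.1 + p.2)) rest
          = List.countP (fun p => decide (maxb ≤ p.2) &&
          !(((i, j) :: rest).any (fun q => decide (p.1 < q.1) && decide (p.2 < q.2))) &&
          decide (ow.1 + ow.2 < p.1 + p.2)) rest := by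
        apply List.countP_congr
        intro p hmem
        simp only [List.any_cons, Bool.and_eq_true, Bool.not_eq_true',
          Bool.or_eq_false_iff, Bool.and_eq_false_iff, decide_eq_true_eq,
          decide_eq_false_iff_not, List.any_eq_false]
        constructor
        · rintro ⟨⟨hmp, hnod⟩, hs⟩
          exact ⟨⟨by omega, ⟨by omega, hnod⟩⟩, hs⟩
        · rintro ⟨⟨hmp, ⟨_, hnod⟩⟩, hs⟩
          exact ⟨⟨hmp, hnod⟩, hs⟩
      rw [hcong]
      simp [List.countP_cons]
      exact fun h _ => absurd h hmb

-- A's loop returns -1 as soon as any member dominates the owner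
theorem loopA_neg (ow : Int × Int) :
    ∀ (L : List (Int × Int)) (maxb answer : Int),
    (∃ p ∈ L, ow.1 < p.1 ∧ ow.2 < p.2) →
    solutionLoop ow L maxb answer = -1 := by
  intro L
  induction L with
  | nil => intro _ _ h; simp at h
  | cons x rest ih =>
    intro maxb answer h
    obtain ⟨i, j⟩ := x
    by_cases hx : ow.1 < i ∧ ow.2 < j
    · simp [solutionLoop, pyLtBoth, hx.1, hx.2]
    · have : ∃ p ∈ rest, ow.1 < p.1 ∧ ow.2 < p.2 := by
        rcases h with ⟨p, hp, hdom⟩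
        rcases List.mem_cons.mp hp with rfl | hp'
        · exact absurd hdom hx
        · exact ⟨p, hp', hdom⟩
      have hxb : pyLtBoth ow (i, j) = false := by
        simp only [pyLtBoth, Bool.and_eq_false_iff, decide_eq_false_iff_not]; omega
      simp only [solutionLoop, hxb, Bool.false_eq_true, if_false]
      by_cases hmb : maxb ≤ j <;> simp [hmb, ih _ _ this]

-- strict countP monotonicity
theorem countP_lt_of {α : Type} (p q : α → Bool)
    (l : List α) (hmono : ∀ x ∈ l, p x = true → q x = true)
    (x : α) (hx : x ∈ l) (hpx : p x = false) (hqx : q x = true) :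
    List.countP p l < List.countP q l := by
  induction l with
  | nil => simp at hx
  | cons y ys ih =>
    rcases List.mem_cons.mp hx with rfl | hx'
    · have hle : List.countP p ys ≤ List.countP q ys :=
        List.countP_mono_left (fun a ha => hmono a (List.mem_cons_of_mem _ ha))
      simp [List.countP_cons, hpx, hqx]
      omega
    · have hlt := ih (fun a ha => hmono a (List.mem_cons_of_mem _ ha)) hx'
      simp only [List.countP_cons]
      by_cases hpy : p y = true
      · have hqy := hmono y List.mem_cons_self hpy
        simp [hpy, hqy]; omega
      · simp only [hpy]
        simp
        split <;> omega

-- A on ow :: others with no owner-dominator, as a count over the unsorted tail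
theorem solutionA_count (ow : Int × Int) (others : List (Int × Int))
    (hnd : ∀ p ∈ others, ¬(ow.1 < p.1 ∧ ow.2 < p.2)) :
    solution (ow :: others) = 1 +
      (List.countP (fun p => decide ((0:Int) ≤ p.2) &&
        !(others.any (fun q => decide (p.1 < q.1) && decide (p.2 < q.2))) &&
        decide (ow.1 + ow.2 < p.1 + p.2)) others : Int) := by
  have hslice : PySem.List.slice (ow :: others) (some 1) none = others := by
    rw [PySem.List.slice_from _ (by norm_num)]; rfl
  have hperm : (PySem.List.sorted2 others (fun x => -x.1) (fun x => x.2) false).Perm others :=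
    PySem.List.sorted2_perm others _ _ false
  simp only [solution, hslice]
  rw [show PySem.List.pyGet? (ow :: others) (0:Int) = some ow by simp [PySem.List.pyGet?, PySem.List.pyIdx?]]
  show solutionLoop ow (PySem.List.sorted2 others (fun x => -x.1) (fun x => x.2) false) 0 1 = _
  rw [loopA_eq ow _ 0 1 (sorted2_pairwise_keyLE others)
    (fun p hp => hnd p (hperm.mem_iff.mp hp))]
  congr 2
  have hcong : List.countP (fun p => decide ((0:Int) ≤ p.2) &&
      !((PySem.List.sorted2 others (fun x => -x.1) (fun x => x.2) false).any
        (fun q => decide (p.1 < q.1) && decide (p.2 < q.2))) &&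
      decide (ow.1 + ow.2 < p.1 + p.2))
      (PySem.List.sorted2 others (fun x => -x.1) (fun x => x.2) false)
      = List.countP (fun p => decide ((0:Int) ≤ p.2) &&
      !(others.any (fun q => decide (p.1 < q.1) && decide (p.2 < q.2))) &&
      decide (ow.1 + ow.2 < p.1 + p.2))
      (PySem.List.sorted2 others (fun x => -x.1) (fun x => x.2) false) := by
    apply List.countP_congr
    intro p _
    have : ((PySem.List.sorted2 others (fun x => -x.1) (fun x => x.2) false).any
        (fun q => decide (p.1 < q.1) && decide (p.2 < q.2)))
        = others.any (fun q => decide (p.1 < q.1) && decide (p.2 < q.2)) :=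
      hperm.any_eq
    rw [this]
  rw [hcong, hperm.countP_eq]

-- ===== VERDICT (by name: the statement is the Claim_ definition above) =====
theorem solution_spec : Claim_unchanged_solution := by
  intro scores _ hpre hnd
  match scores with
  | [] => exact absurd rfl hpre
  | ow :: others =>
    by_cases hdom : ∃ p ∈ others, ow.1 < p.1 ∧ ow.2 < p.2
    · -- both return -1
      have hB : solution_alt (ow :: others) = -1 := by
        rcases hdom with ⟨p, hp, h1, h2⟩
        simp only [solution_alt, pyDominated]
        rw [if_pos]
        refine List.any_eq_true.mpr ⟨p, hp, ?_⟩
        simp [h1, h2]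
      have hA : solution (ow :: others) = -1 := by
        have hslice : PySem.List.slice (ow :: others) (some 1) none = others := by
          rw [PySem.List.slice_from _ (by norm_num)]; rfl
        have hperm := PySem.List.sorted2_perm others (fun x : Int × Int => -x.1) (fun x => x.2) false
        simp only [solution, hslice]
        rw [show PySem.List.pyGet? (ow :: others) (0:Int) = some ow by simp [PySem.List.pyGet?, PySem.List.pyIdx?]]
        show solutionLoop ow (PySem.List.sorted2 others (fun x => -x.1) (fun x => x.2) false) 0 1 = -1
        apply loopA_neg
        rcases hdom with ⟨p, hp, hd⟩
        exact ⟨p, hperm.mem_iff.mpr hp, hd⟩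
      rw [hA, hB]
    · push_neg at hdom
      have hnd' : ∀ p ∈ others, ¬(ow.1 < p.1 ∧ ow.2 < p.2) := by
        intro p hp hc; exact absurd hc.2 (not_lt.mpr (hdom p hp hc.1))
      rw [solutionA_count ow others hnd']
      have hB : solution_alt (ow :: others) = 1 +
          (List.countP (fun p => decide (ow.1 + ow.2 < p.1 + p.2) &&
            !(others.any (fun q => decide (p.1 < q.1) && decide (p.2 < q.2)))) others : Int) := by
        simp only [solution_alt, pyDominated]
        rw [if_neg]
        simp only [List.any_eq_true, not_exists, Bool.and_eq_true, decide_eq_true_eq]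
        rintro p ⟨hp, h1, h2⟩
        exact hnd' p hp ⟨h1, h2⟩
      rw [hB]
      congr 2
      apply List.countP_congr
      intro p hp
      simp only [Bool.and_eq_true, Bool.not_eq_true', decide_eq_true_eq, List.any_eq_false,
        Bool.and_eq_false_iff, decide_eq_false_iff_not]
      constructor
      · rintro ⟨⟨_, hnod⟩, hs⟩; exact ⟨hs, hnod⟩
      · rintro ⟨hs, hnod⟩
        refine ⟨⟨?_, hnod⟩, hs⟩
        by_contra hneg
        push_neg at hneg
        refine hnd ?_
        unfold D_solution pyLtBoth pySum
        simp only [List.tail_cons, List.headD_cons, Bool.and_eq_true,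
          decide_eq_true_eq, not_and]
        refine ⟨fun q hq h1 h2 => hnd' q hq ⟨h1, h2⟩, p, hp, by omega, by omega,
          fun q hq h1 h2 => ?_⟩
        have := hnod q hq
        omega

theorem solution_changed : Claim_changed_solution := by
  unfold Claim_changed_solution; decide

theorem solution_tight : Claim_exact_solution := by
  intro scores _ hpre hD
  match scores with
  | [] => exact absurd rfl hpre
  | ow :: others =>
    unfold D_solution pyLtBoth pySum at hD
    simp only [List.tail_cons, List.headD_cons, Bool.and_eq_true,
      decide_eq_true_eq, not_and] at hD
    obtain ⟨hnodom, p, hp, hneg, hsum, hnod⟩ := hD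
    have hnd' : ∀ q ∈ others, ¬(ow.1 < q.1 ∧ ow.2 < q.2) := fun q hq hc => hnodom q hq hc.1 hc.2
    rw [solutionA_count ow others hnd']
    have hB : solution_alt (ow :: others) = 1 +
        (List.countP (fun p => decide (ow.1 + ow.2 < p.1 + p.2) &&
          !(others.any (fun q => decide (p.1 < q.1) && decide (p.2 < q.2)))) others : Int) := by
      simp only [solution_alt, pyDominated]
      rw [if_neg]
      simp only [List.any_eq_true, not_exists, Bool.and_eq_true, decide_eq_true_eq]
      rintro q ⟨hq, h1, h2⟩
      exact hnd' q hq ⟨h1, h2⟩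
    rw [hB]
    have hlt : List.countP (fun p => decide ((0:Int) ≤ p.2) &&
        !(others.any (fun q => decide (p.1 < q.1) && decide (p.2 < q.2))) &&
        decide (ow.1 + ow.2 < p.1 + p.2)) others
        < List.countP (fun p => decide (ow.1 + ow.2 < p.1 + p.2) &&
        !(others.any (fun q => decide (p.1 < q.1) && decide (p.2 < q.2)))) others := by
      refine countP_lt_of _ _ others (fun x _ hx => ?_) p hp ?_ ?_
      · simp only [Bool.and_eq_true, decide_eq_true_eq] at hx ⊢
        exact ⟨hx.2, hx.1.2⟩
      · have hb : decide ((0:Int) ≤ p.2) = false := decide_eq_false (by omega)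
        simp [hb]
      · simp only [Bool.and_eq_true, Bool.not_eq_true', List.any_eq_false, decide_eq_true_eq]
        refine ⟨by omega, fun q hq => ?_⟩
        simp only [Bool.and_eq_true, decide_eq_true_eq, not_and]
        exact hnod q hq
    intro hcontra
    omega
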